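-- pv_equiv track=rewrite | github.com/mborgeson/BR-Underwriting-Dashboard | src/data_extraction/excel_extraction_system.py | _clean_field_name
-- ===== SOURCE A (Python) =====
-- def _clean_field_name(description: str) -> str:
--     """Convert description to clean field name"""
--     # Remove special characters and spaces
--     clean_name = description.strip()
--     clean_name = clean_name.replace(" ", "_")
--     clean_name = clean_name.replace("-", "_")
--     clean_name = clean_name.replace("(", "")
--     clean_name = clean_name.replace(")", "")
--     clean_name = clean_name.replace("/", "_")
--     clean_name = clean_name.replace(".", "")
--     clean_name = clean_name.upper()
--
--     # Remove duplicate underscores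
--     while "__" in clean_name:
--         clean_name = clean_name.replace("__", "_")
--
--     return clean_name
-- ===== SOURCE B (Python) =====
-- def _clean_field_name(description: str) -> str:
--     out = []
--     for ch in description.strip():
--         if ch in " -/":
--             ch = "_"
--         elif ch in "().":
--             continue
--         if ch == "_" and out and out[-1] == "_":
--             continue
--         out.append(ch)
--     return "".join(out).upper()
-- ===== Notes on version B (the rewrite author's own statement) =====
-- stated objective: alternative
-- what changed: Replaces seven chained full-string replace scans plus a repeated-replace collapse loop by a single character-level pass that maps separator characters to underscores, drops parentheses and dots, and suppresses duplicate underscores inline, uppercasing once at the end.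
import Mathlib
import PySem

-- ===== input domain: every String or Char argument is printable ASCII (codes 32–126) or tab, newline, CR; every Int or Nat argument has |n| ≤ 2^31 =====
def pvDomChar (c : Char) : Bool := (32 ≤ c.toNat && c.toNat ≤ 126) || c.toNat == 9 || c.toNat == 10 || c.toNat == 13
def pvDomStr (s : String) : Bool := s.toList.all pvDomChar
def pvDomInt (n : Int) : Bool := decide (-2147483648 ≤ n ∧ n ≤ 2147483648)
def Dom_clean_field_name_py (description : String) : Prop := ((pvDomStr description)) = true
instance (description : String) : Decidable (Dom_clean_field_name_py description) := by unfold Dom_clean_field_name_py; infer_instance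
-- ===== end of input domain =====

-- B replaces A's seven chained replace() scans plus the repeated-replace collapse loop with one
-- character-level pass that maps/drops/deduplicates in a single traversal (objective: alternative).

-- ===== PORT A =====
-- One non-overlapping left-to-right pass of s.replace("__", "_"), needed to state the
-- termination measure of A's `while "__" in clean_name` loop.
def cfnStep : List Char → List Char
  | [] => []
  | [c] => [c]
  | c1 :: c2 :: t => if c1 = '_' ∧ c2 = '_' then '_' :: cfnStep t else c1 :: cfnStep (c2 :: t)

theorem cfnStep_length_le (l : List Char) : (cfnStep l).length ≤ l.length := by
  induction l using cfnStep.induct with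
  | case1 => simp [cfnStep]
  | case2 c => simp [cfnStep]
  | case3 c1 c2 t h ih => simp [cfnStep, h]; omega
  | case4 c1 c2 t h ih => simp [cfnStep, h] at *; omega

theorem replace_uu_go (fuel : Nat) : ∀ (l acc : List Char), l.length ≤ fuel →
    PySem.Chars.replace.go ['_', '_'] ['_'] fuel l acc = acc.reverse ++ cfnStep l := by
  induction fuel with
  | zero =>
    intro l acc h
    have : l = [] := by cases l <;> simp_all
    subst this
    simp [PySem.Chars.replace.go, cfnStep]
  | succ n ih =>
    intro l acc h
    match l with
    | [] => simp [PySem.Chars.replace.go, cfnStep]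
    | [c] =>
      simp only [PySem.Chars.replace.go]
      rw [if_neg (by simp [List.isPrefixOf])]
      rw [ih [] (c :: acc) (by simp)]
      simp [cfnStep]
    | c1 :: c2 :: t =>
      by_cases h12 : c1 = '_' ∧ c2 = '_'
      · obtain ⟨h1, h2⟩ := h12; subst h1; subst h2
        simp only [PySem.Chars.replace.go, List.isPrefixOf]
        rw [if_pos (by simp)]
        simp only [List.length_cons] at h
        rw [show List.drop ['_','_'].length ('_'::'_'::t) = t from rfl]
        rw [ih t (['_'].reverse ++ acc) (by omega)]
        simp [cfnStep]
      · simp only [PySem.Chars.replace.go, List.isPrefixOf]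
        rw [if_neg (by simp [List.isPrefixOf]; intro h1 h2; exact h12 ⟨h1.symm, h2.symm⟩)]
        simp only [List.length_cons] at h
        rw [ih (c2 :: t) (c1 :: acc) (by simp; omega)]
        simp [cfnStep, if_neg h12]

theorem replace_uu (s : List Char) :
    PySem.Chars.replace s ['_', '_'] ['_'] = cfnStep s := by
  have := replace_uu_go s.length s [] (le_refl _)
  simpa [PySem.Chars.replace] using this

theorem cfnStep_length_lt (l : List Char) (h : ['_', '_'] <:+: l) :
    (cfnStep l).length < l.length := by
  induction l using cfnStep.induct with
  | case1 => simp at h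
  | case2 c =>
    have := h.length_le
    simp at this
  | case3 c1 c2 t h12 ih =>
    simp only [cfnStep, if_pos h12, List.length_cons]
    have := cfnStep_length_le t
    omega
  | case4 c1 c2 t h12 ih =>
    simp only [cfnStep, if_neg h12, List.length_cons]
    rcases List.infix_cons_iff.mp h with hp | hi
    · rw [List.cons_prefix_cons] at hp
      obtain ⟨e1, hp⟩ := hp
      rw [List.cons_prefix_cons] at hp
      exact absurd ⟨e1.symm, hp.1.symm⟩ h12
    · have := ih hi
      simp only [List.length_cons] at this
      omega

-- A's while-loop: while "__" in clean_name: clean_name = clean_name.replace("__", "_")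
def cfnLoop (s : String) : String :=
  if PySem.Str.isIn "__" s then cfnLoop (PySem.Str.replace s "__" "_") else s
termination_by s.toList.length
decreasing_by
  rename_i h
  rw [PySem.Str.toList_replace]
  rw [show ("__" : String).toList = ['_', '_'] from rfl,
      show ("_" : String).toList = ['_'] from rfl]
  rw [replace_uu]
  apply cfnStep_length_lt
  rw [PySem.Str.isIn_eq] at h
  exact (PySem.Chars.isIn_iff_infix _ _).mp h

def clean_field_name_py (description : String) : String :=
  let c0 := PySem.Str.strip description
  let c1 := PySem.Str.replace c0 " " "_"
  let c2 := PySem.Str.replace c1 "-" "_"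
  let c3 := PySem.Str.replace c2 "(" ""
  let c4 := PySem.Str.replace c3 ")" ""
  let c5 := PySem.Str.replace c4 "/" "_"
  let c6 := PySem.Str.replace c5 "." ""
  let c7 := PySem.Str.upper c6
  cfnLoop c7

-- ===== PORT B =====
-- The single pass of Source B: out is kept reversed (head = last appended char).
def cfnAltGo (acc : List Char) : List Char → List Char
  | [] => acc.reverse
  | ch :: t =>
    if ch = ' ' ∨ ch = '-' ∨ ch = '/' then
      -- ch := '_' ; then the duplicate-underscore suppression
      if acc.head? = some '_' then cfnAltGo acc t else cfnAltGo ('_' :: acc) t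
    else if ch = '(' ∨ ch = ')' ∨ ch = '.' then cfnAltGo acc t
    else if ch = '_' ∧ acc.head? = some '_' then cfnAltGo acc t
    else cfnAltGo (ch :: acc) t

def clean_field_name_py_alt (description : String) : String :=
  PySem.Str.upper (String.ofList (cfnAltGo [] (PySem.Str.strip description).toList))

-- ===== PRECONDITION & SPEC =====
def Spec_clean_field_name_py (description : String) (out : String) : Prop := out = clean_field_name_py_alt description
instance (description : String) (out : String) : Decidable (Spec_clean_field_name_py description out) := by unfold Spec_clean_field_name_py; infer_instance

-- ===== CLAIM (what is proved, stated in full; the proofs are below) =====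
def Claim_equal_clean_field_name_py : Prop := ∀ (description : String), Dom_clean_field_name_py description → Spec_clean_field_name_py description (clean_field_name_py description)

-- ===== LEMMAS AND PROOFS =====

-- the character map / filter that A's first six replace calls amount to
def subC (c : Char) : Char := if c = ' ' ∨ c = '-' ∨ c = '/' then '_' else c
def keepC (c : Char) : Bool := !(c = '(' ∨ c = ')' ∨ c = '.')

-- collapse runs of '_' ; p = "the previously emitted character was '_'"
def collAux (p : Bool) : List Char → List Char
  | [] => []
  | c :: t => if c = '_' then (if p then collAux true t else '_' :: collAux true t)
              else c :: collAux false t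

theorem replace_single_go (a : Char) (new : List Char) (fuel : Nat) :
    ∀ (l acc : List Char), l.length ≤ fuel →
    PySem.Chars.replace.go [a] new fuel l acc
      = acc.reverse ++ l.flatMap (fun c => if c = a then new else [c]) := by
  induction fuel with
  | zero =>
    intro l acc h
    have : l = [] := by cases l <;> simp_all
    subst this
    simp [PySem.Chars.replace.go]
  | succ n ih =>
    intro l acc h
    match l with
    | [] => simp [PySem.Chars.replace.go]
    | c :: t =>
      simp only [List.length_cons] at h
      by_cases hc : c = a
      · subst hc
        simp only [PySem.Chars.replace.go, List.isPrefixOf]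
        rw [if_pos (by simp)]
        rw [show List.drop [c].length (c :: t) = t from rfl]
        rw [ih t (new.reverse ++ acc) (by omega)]
        simp
      · simp only [PySem.Chars.replace.go, List.isPrefixOf]
        rw [if_neg (by simp [hc]; intro h'; exact hc h'.symm)]
        rw [ih t (c :: acc) (by omega)]
        simp [hc]

theorem replace_single (a : Char) (new s : List Char) :
    PySem.Chars.replace s [a] new
      = s.flatMap (fun c => if c = a then new else [c]) := by
  have := replace_single_go a new s.length s [] (le_refl _)
  simpa [PySem.Chars.replace] using this

theorem rep_map (a b : Char) (s : List Char) :
    PySem.Chars.replace s [a] [b] = s.map (fun c => if c = a then b else c) := by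
  rw [replace_single]
  induction s with
  | nil => simp
  | cons c t ih => by_cases h : c = a <;> simp [h, ih]

theorem rep_del (a : Char) (s : List Char) :
    PySem.Chars.replace s [a] [] = s.filter (fun c => !(c = a)) := by
  rw [replace_single]
  induction s with
  | nil => simp
  | cons c t ih => by_cases h : c = a <;> simp [h, ih]

-- A's six replaces = one filter + one map
theorem chain_eq (l : List Char) :
    PySem.Chars.replace (PySem.Chars.replace (PySem.Chars.replace (PySem.Chars.replace
      (PySem.Chars.replace (PySem.Chars.replace l [' '] ['_']) ['-'] ['_']) ['('] [])
      [')'] []) ['/'] ['_']) ['.'] []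
    = (l.filter keepC).map subC := by
  simp only [rep_map, rep_del, List.filter_map, List.filter_filter, List.map_map]
  congr 1
  · funext c
    by_cases h1 : c = ' ' <;> by_cases h2 : c = '-' <;> by_cases h3 : c = '/' <;>
      simp [h1, h2, h3, subC]
  · congr 1
    funext c
    by_cases h1 : c = ' ' <;> by_cases h2 : c = '-' <;> by_cases h3 : c = '/' <;>
      by_cases h4 : c = '(' <;> by_cases h5 : c = ')' <;> by_cases h6 : c = '.' <;>
      simp_all [keepC]

theorem upperChar_eq_underscore_iff (c : Char) :
    PySem.Chars.upperChar c = '_' ↔ c = '_' := by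
  constructor
  · intro h
    by_contra hne
    simp only [PySem.Chars.upperChar, PySem.Chars.islower, Bool.and_eq_true,
      decide_eq_true_eq] at h
    split at h
    · rename_i hlo
      obtain ⟨hg1, hg2⟩ := hlo
      have h1' : ('a').toNat ≤ c.toNat := hg1
      have h2' : c.toNat ≤ ('z').toNat := hg2
      have ha : ('a').toNat = 97 := by decide
      have hz : ('z').toNat = 122 := by decide
      have hv : (Char.ofNat (c.toNat - 32)).toNat = c.toNat - 32 := by
        rw [Char.toNat_ofNat, if_pos]
        exact Or.inl (by omega)
      have h95 := congrArg Char.toNat h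
      rw [hv] at h95
      have : ('_').toNat = 95 := by decide
      omega
    · exact hne h
  · intro h; subst h; decide

theorem collAux_map_upper (l : List Char) : ∀ (p : Bool),
    collAux p (l.map PySem.Chars.upperChar) = (collAux p l).map PySem.Chars.upperChar := by
  induction l with
  | nil => intro p; simp [collAux]
  | cons c t ih =>
    intro p
    by_cases hc : c = '_'
    · subst hc
      simp only [List.map_cons, collAux, if_pos (show PySem.Chars.upperChar '_' = '_' from rfl),
        if_pos rfl, ih]
      cases p <;> simp [show PySem.Chars.upperChar '_' = '_' from rfl]
    · have : PySem.Chars.upperChar c ≠ '_' := fun h => hc ((upperChar_eq_underscore_iff c).mp h)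
      simp [List.map_cons, collAux, this, hc, ih]

theorem collAux_cfnStep (l : List Char) : ∀ (p : Bool),
    collAux p (cfnStep l) = collAux p l := by
  induction l using cfnStep.induct with
  | case1 => intro p; simp [cfnStep]
  | case2 c => intro p; simp [cfnStep]
  | case3 c1 c2 t h ih =>
    obtain ⟨e1, e2⟩ := h; subst e1; subst e2
    intro p
    cases p <;> simp [cfnStep, collAux, ih]
  | case4 c1 c2 t h ih =>
    intro p
    by_cases hc : c1 = '_'
    · subst hc
      have hc2 : ¬ c2 = '_' := fun e => h ⟨rfl, e⟩
      cases p <;> simp [cfnStep, hc2, collAux, ih]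
    · simp [cfnStep, h, collAux, hc, ih]

theorem collAux_of_no_infix (l : List Char) : ∀ (p : Bool),
    ¬ (['_', '_'] <:+: l) → (p = true → l.head? ≠ some '_') → collAux p l = l := by
  induction l with
  | nil => intro p _ _; simp [collAux]
  | cons c t ih =>
    intro p hinf hp
    rw [List.infix_cons_iff] at hinf
    push_neg at hinf
    obtain ⟨hpre, hinf⟩ := hinf
    by_cases hc : c = '_'
    · subst hc
      have hpfalse : p = false := by
        cases p
        · rfl
        · exact absurd rfl (hp rfl)
      subst hpfalse
      have ht : collAux true t = t := by
        apply ih true hinf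
        intro _ hh
        exfalso
        cases t with
        | nil => simp at hh
        | cons c' t' =>
          simp at hh
          subst hh
          exact hpre ⟨t', rfl⟩
      simp [collAux, ht]
    · simp [collAux, hc, ih false hinf (by simp)]

theorem cfnLoop_toList (s : String) :
    (cfnLoop s).toList = collAux false s.toList := by
  induction s using cfnLoop.induct with
  | case1 s h ih =>
    rw [cfnLoop, if_pos h, ih]
    rw [PySem.Str.toList_replace,
      show ("__" : String).toList = ['_', '_'] from rfl,
      show ("_" : String).toList = ['_'] from rfl, replace_uu, collAux_cfnStep]
  | case2 s h =>
    rw [cfnLoop, if_neg h]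
    rw [Bool.not_eq_true, PySem.Str.isIn_eq] at h
    exact (collAux_of_no_infix s.toList false
      ((PySem.Chars.isIn_eq_false_iff _ _).mp (by simpa using h)) (by simp)).symm

theorem cfnAltGo_eq (l : List Char) : ∀ (acc : List Char),
    cfnAltGo acc l
      = acc.reverse ++ collAux (decide (acc.head? = some '_')) ((l.filter keepC).map subC) := by
  induction l with
  | nil => intro acc; simp [cfnAltGo, collAux]
  | cons c t ih =>
    intro acc
    by_cases h1 : c = ' ' ∨ c = '-' ∨ c = '/'
    · have hk : keepC c = true := by
        rcases h1 with h | h | h <;> subst h <;> decide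
      have hs : subC c = '_' := by simp [subC, h1]
      by_cases ha : acc.head? = some '_'
      · simp [cfnAltGo, h1, ha, List.filter_cons, hk, hs, collAux, ih acc]
      · simp [cfnAltGo, h1, ha, List.filter_cons, hk, hs, collAux, ih ('_' :: acc)]
    · by_cases h2 : c = '(' ∨ c = ')' ∨ c = '.'
      · have hk : keepC c = false := by
          rcases h2 with h | h | h <;> subst h <;> decide
        simp only [cfnAltGo, if_neg h1, if_pos h2, List.filter_cons, hk]
        simpa using ih acc
      · have hk : keepC c = true := by simp [keepC, h2]
        have hs : subC c = c := by simp [subC, h1]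
        by_cases hc : c = '_'
        · subst hc
          by_cases ha : acc.head? = some '_'
          · simp [cfnAltGo, h1, h2, ha, List.filter_cons, hk, hs, collAux, ih acc]
          · simp [cfnAltGo, h1, h2, ha, List.filter_cons, hk, hs, collAux, ih ('_' :: acc)]
        · simp [cfnAltGo, h1, h2, hc, List.filter_cons, hk, hs, collAux, ih (c :: acc)]

-- ===== VERDICT (by name: the statement is the Claim_ definition above) =====
theorem clean_field_name_py_spec : Claim_equal_clean_field_name_py := by
  intro description _
  unfold Spec_clean_field_name_py clean_field_name_py clean_field_name_py_alt
  apply String.ext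
  simp only [cfnLoop_toList, PySem.Str.toList_upper, PySem.Chars.upper, PySem.Str.toList_replace]
  rw [show (" " : String).toList = [' '] from rfl, show ("_" : String).toList = ['_'] from rfl,
    show ("-" : String).toList = ['-'] from rfl, show ("(" : String).toList = ['('] from rfl,
    show (")" : String).toList = [')'] from rfl, show ("/" : String).toList = ['/'] from rfl,
    show ("." : String).toList = ['.'] from rfl, show ("" : String).toList = [] from rfl]
  rw [chain_eq, collAux_map_upper]
  rw [show (String.ofList (cfnAltGo [] (PySem.Str.strip description).toList)).toList
      = cfnAltGo [] (PySem.Str.strip description).toList by simp]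
  rw [cfnAltGo_eq]
  simp
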